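-- pv_equiv track=rewrite | github.com/jennyferAris/cmch-ic2 | gestion_usuarios.py | obtener_siguiente_nivel_sugerido
-- ===== SOURCE A (Python) =====
-- def obtener_siguiente_nivel_sugerido(roles_actuales):
--     """Sugiere el siguiente nivel basado en los existentes"""
--     if not roles_actuales:
--         return 0
--
--     niveles_usados = [info[1] for info in roles_actuales.values()]
--     for nivel in range(0, 6):
--         if nivel not in niveles_usados:
--             return nivel
--     return 0
-- ===== SOURCE B (Python) =====
-- def obtener_siguiente_nivel_sugerido(roles_actuales):
--     """Sugiere el siguiente nivel basado en los existentes"""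
--     if not roles_actuales:
--         return 0
--     mask = 0
--     for info in roles_actuales.values():
--         nivel = info[1]
--         if 0 <= nivel <= 5:
--             mask |= 1 << nivel
--     if mask == 63:
--         return 0
--     # lowest zero bit of mask: mask ^ (mask+1) == 2^(k+1)-1 where k = that index
--     return (mask ^ (mask + 1)).bit_length() - 1
-- ===== Notes on version B (the rewrite author's own statement) =====
-- stated objective: alternative
-- what changed: Replaces A's scan over range(0,6) with a list-membership test per level by a single pass over the dict values that accumulates a 6-bit mask of used levels, then extracts the smallest unused level arithmetically via (mask ^ (mask+1)).bit_length() - 1 (no membership scans, no iteration over candidate levels).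
import Mathlib
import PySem

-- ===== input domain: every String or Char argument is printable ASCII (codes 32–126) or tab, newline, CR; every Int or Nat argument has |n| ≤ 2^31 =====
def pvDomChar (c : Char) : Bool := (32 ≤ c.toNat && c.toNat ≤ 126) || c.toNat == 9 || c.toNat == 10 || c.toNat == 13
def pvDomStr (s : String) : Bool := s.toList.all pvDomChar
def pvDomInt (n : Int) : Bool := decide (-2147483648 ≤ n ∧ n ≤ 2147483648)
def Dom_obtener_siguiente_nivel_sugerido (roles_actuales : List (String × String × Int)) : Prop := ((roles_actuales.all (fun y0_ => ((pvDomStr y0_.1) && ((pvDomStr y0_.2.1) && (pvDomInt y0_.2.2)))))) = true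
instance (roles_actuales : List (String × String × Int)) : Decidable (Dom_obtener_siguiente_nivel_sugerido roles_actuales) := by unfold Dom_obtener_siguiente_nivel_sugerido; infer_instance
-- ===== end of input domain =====

-- B replaces A's scan over range(0,6) with membership tests by a single pass over the
-- dict values accumulating a 6-bit mask of used levels, then extracts the lowest zero
-- bit arithmetically; objective: alternative (no membership scans at all).

-- ===== PORT A =====
-- the 'for nivel in range(0, 6): if nivel not in niveles_usados: return nivel' loop
def pvALoop (niveles_usados : List Int) : List Int → Int
  | [] => 0                                   -- loop fell through: 'return 0'
  | nivel :: rest =>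
      if ¬ (niveles_usados.contains nivel) then nivel
      else pvALoop niveles_usados rest

def obtener_siguiente_nivel_sugerido (roles_actuales : List (String × String × Int)) : Int :=
  if roles_actuales.isEmpty then 0
  else
    let niveles_usados := roles_actuales.map (fun info => info.2.2)
    pvALoop niveles_usados (PySem.List.pyRange 0 6 1)

-- ===== PORT B =====
-- the 'for info in roles_actuales.values(): nivel = info[1]; if 0 <= nivel <= 5: mask |= 1 << nivel'
-- loop; Python's mask is a nonnegative int (only |=' of positive bits), so it is a Nat here
def pvMaskFold (mask : Nat) : List (String × String × Int) → Nat
  | [] => mask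
  | info :: rest =>
      let nivel := info.2.2
      pvMaskFold (if 0 ≤ nivel ∧ nivel ≤ 5 then mask ||| (1 <<< nivel.toNat) else mask) rest

def obtener_siguiente_nivel_sugerido_alt (roles_actuales : List (String × String × Int)) : Int :=
  if roles_actuales.isEmpty then 0
  else
    let mask := pvMaskFold 0 roles_actuales
    if mask == 63 then 0
    else
      -- '(mask ^ (mask + 1)).bit_length() - 1'; for n ≥ 1, n.bit_length() = Nat.log2 n + 1,
      -- and mask ^ (mask+1) ≥ 1 always
      ((Nat.log2 (mask ^^^ (mask + 1)) + 1) - 1 : Nat)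

-- ===== PRECONDITION & SPEC =====
def Spec_obtener_siguiente_nivel_sugerido (roles_actuales : List (String × String × Int)) (out : Int) : Prop := out = obtener_siguiente_nivel_sugerido_alt roles_actuales
instance (roles_actuales : List (String × String × Int)) (out : Int) : Decidable (Spec_obtener_siguiente_nivel_sugerido roles_actuales out) := by unfold Spec_obtener_siguiente_nivel_sugerido; infer_instance

-- ===== CLAIM (what is proved, stated in full; the proofs are below) =====
def Claim_equal_obtener_siguiente_nivel_sugerido : Prop := ∀ (roles_actuales : List (String × String × Int)), Dom_obtener_siguiente_nivel_sugerido roles_actuales → Spec_obtener_siguiente_nivel_sugerido roles_actuales (obtener_siguiente_nivel_sugerido roles_actuales)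

-- ===== LEMMAS AND PROOFS =====

-- the fold factors through lor
theorem pvMaskFold_or (l : List (String × String × Int)) : ∀ m : Nat,
    pvMaskFold m l = m ||| pvMaskFold 0 l := by
  induction l with
  | nil => intro m; simp [pvMaskFold]
  | cons x r ih =>
    intro m
    simp only [pvMaskFold]
    by_cases h : 0 ≤ x.2.2 ∧ x.2.2 ≤ 5
    · rw [if_pos h, if_pos h, ih (m ||| _), ih (0 ||| _)]
      simp [Nat.lor_assoc]
    · rw [if_neg h, if_neg h, ih m]

-- value of the accumulated mask as a function of the six membership booleans
def pvBitOf (lv : List Int) : Nat :=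
  (if lv.contains 0 then 1 else 0) ||| (if lv.contains 1 then 2 else 0) |||
  (if lv.contains 2 then 4 else 0) ||| (if lv.contains 3 then 8 else 0) |||
  (if lv.contains 4 then 16 else 0) ||| (if lv.contains 5 then 32 else 0)

theorem pvMaskFold_eq_bitOf (l : List (String × String × Int)) :
    pvMaskFold 0 l = pvBitOf (l.map (fun info => info.2.2)) := by
  induction l with
  | nil => simp [pvMaskFold, pvBitOf]
  | cons x r ih =>
    simp only [pvMaskFold, List.map_cons]
    rw [pvMaskFold_or, ih]
    by_cases h : 0 ≤ x.2.2 ∧ x.2.2 ≤ 5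
    · have hx : x.2.2 = 0 ∨ x.2.2 = 1 ∨ x.2.2 = 2 ∨ x.2.2 = 3 ∨ x.2.2 = 4 ∨ x.2.2 = 5 := by omega
      set lv := r.map (fun info => info.2.2) with hlv
      rcases hx with h0 | h0 | h0 | h0 | h0 | h0 <;>
        rw [if_pos h, h0] <;>
        by_cases c0 : lv.contains (0:Int) <;> by_cases c1 : lv.contains (1:Int) <;>
        by_cases c2 : lv.contains (2:Int) <;> by_cases c3 : lv.contains (3:Int) <;>
        by_cases c4 : lv.contains (4:Int) <;> by_cases c5 : lv.contains (5:Int) <;>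
        simp only [pvBitOf, List.contains_cons, c0, c1, c2, c3, c4, c5] <;> decide
    · have e : ∀ k : Int, 0 ≤ k → k ≤ 5 → (k == x.2.2) = false := by
        intro k hk1 hk2
        simp only [beq_eq_false_iff_ne, ne_eq]
        omega
      rw [if_neg h]
      simp only [pvBitOf, List.contains_cons,
        e 0 (by omega) (by omega), e 1 (by omega) (by omega), e 2 (by omega) (by omega),
        e 3 (by omega) (by omega), e 4 (by omega) (by omega), e 5 (by omega) (by omega),
        Bool.false_or, Nat.zero_or]

-- core: the early-return scan over [0..5] equals the bitmask extraction
theorem pv_core (lv : List Int) :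
    pvALoop lv [0, 1, 2, 3, 4, 5] =
      (if pvBitOf lv == 63 then 0
       else (((Nat.log2 (pvBitOf lv ^^^ (pvBitOf lv + 1)) + 1) - 1 : Nat) : Int)) := by
  by_cases c0 : lv.contains (0:Int) <;> by_cases c1 : lv.contains (1:Int) <;>
  by_cases c2 : lv.contains (2:Int) <;> by_cases c3 : lv.contains (3:Int) <;>
  by_cases c4 : lv.contains (4:Int) <;> by_cases c5 : lv.contains (5:Int) <;>
    simp only [pvALoop, pvBitOf, c0, c1, c2, c3, c4, c5] <;> decide

-- ===== VERDICT (by name: the statement is the Claim_ definition above) =====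
theorem obtener_siguiente_nivel_sugerido_spec : Claim_equal_obtener_siguiente_nivel_sugerido := by
  intro ra _
  unfold Spec_obtener_siguiente_nivel_sugerido obtener_siguiente_nivel_sugerido
    obtener_siguiente_nivel_sugerido_alt
  by_cases he : ra.isEmpty
  · simp [he]
  · simp only [he, Bool.false_eq_true, if_false]
    rw [pvMaskFold_eq_bitOf]
    have hR : PySem.List.pyRange 0 6 1 = [0, 1, 2, 3, 4, 5] := by decide
    rw [hR]
    exact pv_core (ra.map (fun info => info.2.2))
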